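-- pv_equiv track=rewrite | github.com/greynewell/matchspec | src/mcpbr/reports/enhanced_markdown.py | _categorize_outcomes
-- ===== SOURCE A (Python) =====
-- from typing import Any
--
-- def _categorize_outcomes(tasks: list[dict[str, Any]]) -> dict[str, int]:
--     """Categorize tasks into resolution outcome buckets.
--
--     Categories:
--     - MCP Only: resolved by MCP but not baseline
--     - Baseline Only: resolved by baseline but not MCP
--     - Both: resolved by both
--     - Neither: resolved by neither
--
--     Args:
--         tasks: List of task result dicts.
--
--     Returns:
--         Mapping of category name to count.
--     """
--     mcp_only = 0
--     baseline_only = 0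
--     both = 0
--     neither = 0
--
--     for task in tasks:
--         mcp_resolved = (task.get("mcp") or {}).get("resolved", False)
--         bl_resolved = (task.get("baseline") or {}).get("resolved", False)
--
--         if mcp_resolved and bl_resolved:
--             both += 1
--         elif mcp_resolved and not bl_resolved:
--             mcp_only += 1
--         elif not mcp_resolved and bl_resolved:
--             baseline_only += 1
--         else:
--             neither += 1
--
--     return {
--         "MCP Only": mcp_only,
--         "Baseline Only": baseline_only,
--         "Both": both,
--         "Neither": neither,
--     }
-- ===== SOURCE B (Python) =====
-- def _categorize_outcomes(tasks):
--     """Inclusion-exclusion rewrite: extract the two flags once, take three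
--     simple counts (mcp-resolved, baseline-resolved, both), and derive all
--     four buckets arithmetically -- no per-task four-way classification."""
--     flags = [
--         ((t.get("mcp") or {}).get("resolved", False),
--          (t.get("baseline") or {}).get("resolved", False))
--         for t in tasks
--     ]
--     n = len(flags)
--     mcp = sum(1 for m, _ in flags if m)
--     bl = sum(1 for _, b in flags if b)
--     both = sum(1 for m, b in flags if m and b)
--     return {
--         "MCP Only": mcp - both,
--         "Baseline Only": bl - both,
--         "Both": both,
--         "Neither": n - mcp - bl + both,
--     }
-- ===== Notes on version B (the rewrite author's own statement) =====
-- stated objective: alternative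
-- what changed: Instead of classifying each task into one of four buckets with an if/elif chain and four running counters, B extracts the flag pairs once, takes three simple counts (mcp, baseline, both) in staged passes, and derives all four bucket values by inclusion-exclusion arithmetic (mcp-both, bl-both, both, n-mcp-bl+both).
import Mathlib
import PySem

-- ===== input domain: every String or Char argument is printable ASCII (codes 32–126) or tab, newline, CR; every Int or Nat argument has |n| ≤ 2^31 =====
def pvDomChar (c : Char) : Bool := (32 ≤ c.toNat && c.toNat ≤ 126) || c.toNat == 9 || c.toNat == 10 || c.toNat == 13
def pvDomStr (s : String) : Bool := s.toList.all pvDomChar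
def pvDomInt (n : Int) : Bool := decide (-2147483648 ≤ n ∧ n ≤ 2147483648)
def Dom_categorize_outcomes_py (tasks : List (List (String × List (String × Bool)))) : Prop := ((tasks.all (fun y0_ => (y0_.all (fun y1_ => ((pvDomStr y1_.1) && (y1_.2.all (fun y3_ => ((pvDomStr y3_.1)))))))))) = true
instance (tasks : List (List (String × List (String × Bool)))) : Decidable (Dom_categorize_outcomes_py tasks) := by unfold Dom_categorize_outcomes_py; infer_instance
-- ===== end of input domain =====

-- B replaces A's per-task four-way if/elif classification into four counters by three
-- staged counts (mcp, baseline, both) combined by inclusion-exclusion arithmetic (alternative, same cost).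


-- ===== PORT A =====
-- `(task.get("mcp") or {})`: a missing key gives None→{}; an empty dict is falsy and also gives {};
-- so it equals getD with default [] (exact, since the only falsy dict is the empty one).
def pyAStep (st : Int × Int × Int × Int) (task : List (String × List (String × Bool))) :
    Int × Int × Int × Int :=
  let mcp_resolved := (PySem.Dict.mk ((PySem.Dict.mk task).getD "mcp" [])).getD "resolved" false
  let bl_resolved := (PySem.Dict.mk ((PySem.Dict.mk task).getD "baseline" [])).getD "resolved" false
  let (mcp_only, baseline_only, both, neither) := st
  if mcp_resolved && bl_resolved then (mcp_only, baseline_only, both + 1, neither)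
  else if mcp_resolved && !bl_resolved then (mcp_only + 1, baseline_only, both, neither)
  else if !mcp_resolved && bl_resolved then (mcp_only, baseline_only + 1, both, neither)
  else (mcp_only, baseline_only, both, neither + 1)

def categorize_outcomes_py (tasks : List (List (String × List (String × Bool)))) : List (String × Int) :=
  let st := tasks.foldl pyAStep (0, 0, 0, 0)
  [("MCP Only", st.1), ("Baseline Only", st.2.1), ("Both", st.2.2.1), ("Neither", st.2.2.2)]

-- ===== PORT B =====
-- the flag-pair comprehension of Source B (same `or {}` reading as in port A)
def pvFlags (tasks : List (List (String × List (String × Bool)))) : List (Bool × Bool) :=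
  tasks.map (fun t =>
    ((PySem.Dict.mk ((PySem.Dict.mk t).getD "mcp" [])).getD "resolved" false,
     (PySem.Dict.mk ((PySem.Dict.mk t).getD "baseline" [])).getD "resolved" false))

def categorize_outcomes_py_alt (tasks : List (List (String × List (String × Bool)))) : List (String × Int) :=
  let flags := pvFlags tasks
  let n : Int := flags.length
  let mcp : Int := (flags.filter (fun p => p.1)).length
  let bl : Int := (flags.filter (fun p => p.2)).length
  let both : Int := (flags.filter (fun p => p.1 && p.2)).length
  [("MCP Only", mcp - both), ("Baseline Only", bl - both),
   ("Both", both), ("Neither", n - mcp - bl + both)]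

-- ===== PRECONDITION & SPEC =====
def Spec_categorize_outcomes_py (tasks : List (List (String × List (String × Bool)))) (out : List (String × Int)) : Prop := out = categorize_outcomes_py_alt tasks
instance (tasks : List (List (String × List (String × Bool)))) (out : List (String × Int)) : Decidable (Spec_categorize_outcomes_py tasks out) := by unfold Spec_categorize_outcomes_py; infer_instance

-- ===== CLAIM (what is proved, stated in full; the proofs are below) =====
def Claim_equal_categorize_outcomes_py : Prop := ∀ (tasks : List (List (String × List (String × Bool)))), Dom_categorize_outcomes_py tasks → Spec_categorize_outcomes_py tasks (categorize_outcomes_py tasks)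

-- ===== LEMMAS AND PROOFS =====

-- A's fold, expressed over the flag pairs: each counter is the count of its bucket
theorem pv_fold_counts (tasks : List (List (String × List (String × Bool)))) :
    ∀ (a b c d : Int),
      tasks.foldl pyAStep (a, b, c, d) =
        (a + ((pvFlags tasks).countP (fun p => p.1 && !p.2) : Int),
         b + ((pvFlags tasks).countP (fun p => !p.1 && p.2) : Int),
         c + ((pvFlags tasks).countP (fun p => p.1 && p.2) : Int),
         d + ((pvFlags tasks).countP (fun p => !p.1 && !p.2) : Int)) := by
  induction tasks with
  | nil => intro a b c d; simp [pvFlags]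
  | cons t ts ih =>
    intro a b c d
    simp only [List.foldl_cons, pyAStep, pvFlags, List.map_cons, List.countP_cons]
    generalize (PySem.Dict.mk ((PySem.Dict.mk t).getD "mcp" [])).getD "resolved" false = mr
    generalize (PySem.Dict.mk ((PySem.Dict.mk t).getD "baseline" [])).getD "resolved" false = br
    cases mr <;> cases br <;>
      simp only [Bool.not_true, Bool.not_false, Bool.and_true, Bool.and_false, if_true, ih] <;>
      simp only [pvFlags] <;> refine Prod.ext ?_ (Prod.ext ?_ (Prod.ext ?_ ?_)) <;>
      simp <;> ring

-- splitting a count over a second flag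
theorem pv_countP_split (fs : List (Bool × Bool)) (f g : Bool × Bool → Bool) :
    fs.countP f = fs.countP (fun p => f p && g p) + fs.countP (fun p => f p && !g p) := by
  induction fs with
  | nil => rfl
  | cons x xs ih =>
    simp only [List.countP_cons]
    cases hf : f x <;> cases hg : g x <;> simp [ih] <;> omega

-- length as the count of anything at all
theorem pv_length_split (fs : List (Bool × Bool)) :
    fs.length = fs.countP (fun p => p.1) + fs.countP (fun p => !p.1 && p.2)
      + fs.countP (fun p => !p.1 && !p.2) := by
  induction fs with
  | nil => rfl
  | cons x xs ih =>
    simp only [List.countP_cons, List.length_cons]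
    cases h1 : x.1 <;> cases h2 : x.2 <;> simp [ih] <;> omega

-- ===== VERDICT (by name: the statement is the Claim_ definition above) =====
theorem categorize_outcomes_py_spec : Claim_equal_categorize_outcomes_py := by
  intro tasks _
  show _ = _
  simp only [categorize_outcomes_py, categorize_outcomes_py_alt,
    pv_fold_counts tasks 0 0 0 0, ← List.countP_eq_length_filter]
  have h1 := pv_countP_split (pvFlags tasks) (fun p => p.1) (fun p => p.2)
  have h2 := pv_countP_split (pvFlags tasks) (fun p => p.2) (fun p => p.1)
  have h3 := pv_length_split (pvFlags tasks)
  have h4 : (pvFlags tasks).countP (fun p => p.2 && p.1)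
      = (pvFlags tasks).countP (fun p => p.1 && p.2) := by
    apply List.countP_congr; intro p _; simp [Bool.and_comm]
  have h5 : (pvFlags tasks).countP (fun p => p.2 && !p.1)
      = (pvFlags tasks).countP (fun p => !p.1 && p.2) := by
    apply List.countP_congr; intro p _; simp [Bool.and_comm]
  simp only [h4, h5] at h1 h2
  refine List.ext_getElem (by simp) ?_
  intro i hi _
  have hi4 : i < 4 := by simpa [categorize_outcomes_py, pv_fold_counts tasks 0 0 0 0] using hi
  interval_cases i <;> simp <;> omega
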